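-- pv_equiv track=rewrite | github.com/forealmy/eveng-ops | scripts/kali联动.py | _find_attack_path
-- ===== SOURCE A (Python) =====
-- from typing import Any, Dict, List, Optional, Tuple
--
-- def _find_attack_path(
--
--     src: str,
--     dst: str,
--     net_to_nodes: Dict[str, List[str]],
-- ) -> List[str]:
--     """简单贪心搜索从 src 到 dst 的路径（经过网络）"""
--     if src == dst:
--         return [src]
--
--     # 构建节点到网络到节点的邻接表
--     node_neighbors: Dict[str, List[Tuple[str, str]]] = {}
--     for net_name, node_list in net_to_nodes.items():
--         for node in node_list:
--             if node not in node_neighbors: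
--                 node_neighbors[node] = []
--             for other in node_list:
--                 if other != node:
--                     node_neighbors[node].append((other, net_name))
--
--     # BFS
--     visited = {src}
--     queue = [(src, [src])]
--
--     while queue:
--         current, path = queue.pop(0)
--         for neighbor, via_net in node_neighbors.get(current, []):
--             if neighbor == dst:
--                 return path + [neighbor]
--             if neighbor not in visited:
--                 visited.add(neighbor)
--                 queue.append((neighbor, path + [neighbor]))
--
--     return []
-- ===== SOURCE B (Python) =====
-- from collections import deque
--
--
-- def _find_attack_path(src, dst, net_to_nodes):
--     if src == dst:
--         return [src]
--
--     # node -> list of network names (one per occurrence)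
--     member_of = {}
--     for net_name, node_list in net_to_nodes.items():
--         for node in node_list:
--             member_of.setdefault(node, []).append(net_name)
--
--     parent = {}
--     visited = {src}
--     used_nets = set()
--     queue = deque([src])
--
--     while queue:
--         current = queue.popleft()
--         for net_name in member_of.get(current, []):
--             if net_name in used_nets:
--                 continue
--             used_nets.add(net_name)
--             for w in net_to_nodes[net_name]:
--                 if w == current:
--                     continue
--                 if w == dst:
--                     parent[w] = current
--                     path = [w]
--                     while path[-1] != src:
--                         path.append(parent[path[-1]])
--                     path.reverse()
--                     return path
--                 if w not in visited:
--                     visited.add(w)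
--                     parent[w] = current
--                     queue.append(w)
--     return []
-- ===== Notes on version B (the rewrite author's own statement) =====
-- stated objective: faster
-- what changed: B replaces A's quadratic (neighbor,net) pair-adjacency and path-carrying list.pop(0) BFS by a parent-pointer BFS: a linear node-to-network-name index, a deque of plain nodes, an expand-each-network-once set, and a single backward path reconstruction from parent pointers at the end.
import Mathlib
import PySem

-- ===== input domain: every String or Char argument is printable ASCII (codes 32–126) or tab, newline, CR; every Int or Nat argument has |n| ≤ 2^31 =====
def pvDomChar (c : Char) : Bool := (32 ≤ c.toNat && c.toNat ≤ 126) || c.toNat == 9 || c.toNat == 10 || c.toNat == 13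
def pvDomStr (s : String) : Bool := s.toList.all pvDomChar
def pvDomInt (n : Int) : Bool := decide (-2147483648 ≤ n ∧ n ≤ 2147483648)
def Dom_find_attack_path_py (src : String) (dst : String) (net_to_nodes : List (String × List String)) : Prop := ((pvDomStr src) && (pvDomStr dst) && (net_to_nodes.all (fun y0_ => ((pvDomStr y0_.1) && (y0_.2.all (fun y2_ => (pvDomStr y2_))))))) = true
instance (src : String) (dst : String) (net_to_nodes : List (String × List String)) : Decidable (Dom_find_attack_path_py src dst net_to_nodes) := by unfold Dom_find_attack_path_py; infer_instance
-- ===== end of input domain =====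

-- B replaces A's quadratic (neighbor,net) pair-adjacency and path-carrying list.pop(0) BFS by a
-- parent-pointer BFS over a node→network-name index with an expand-each-network-once rule and a
-- single backward path reconstruction at the end (objective: faster); the returned path is identical.

-- ===== PORT A =====
-- Both ports receive the dict argument as an association list; like the Python dict() they
-- iterate its normalized items (PySem.Dict.ofList = Python dict construction).
-- pvFuel bounds the number of BFS iterations (at most one enqueue per total membership),
-- so the fuel guard never fires; it is a totality guard, not part of the algorithm.
def pvFuel (items : List (String × List String)) : Nat :=
  items.foldl (fun n p => n + p.2.length) 2

-- A's innermost 'for other in node_list' loop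
def pvInnerA (net node : String) (members : List String)
    (d : PySem.Dict String (List (String × String))) :
    PySem.Dict String (List (String × String)) :=
  members.foldl
    (fun d other => if other ≠ node then d.modify node [] (fun l => l ++ [(other, net)]) else d) d

-- A's 'for node in node_list' loop for one network entry
def pvItemA (d : PySem.Dict String (List (String × String))) (p : String × List String) :
    PySem.Dict String (List (String × String)) :=
  p.2.foldl
    (fun d node => pvInnerA p.1 node p.2 (if d.contains node then d else d.insert node [])) d

-- A's adjacency construction over all network entries
def pvNbrsA (items : List (String × List String)) : PySem.Dict String (List (String × String)) :=
  items.foldl pvItemA PySem.Dict.empty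

-- A's inner 'for neighbor, via_net in node_neighbors.get(current, [])' loop (early return = .inl)
def pvScanA (dst : String) (path : List String) :
    List (String × String) → PySem.Set String → List (String × List String) →
    Sum (List String) (PySem.Set String × List (String × List String))
  | [], visited, queue => .inr (visited, queue)
  | (neighbor, _) :: rest, visited, queue =>
    if neighbor = dst then .inl (path ++ [neighbor])
    else if visited.contains neighbor then pvScanA dst path rest visited queue
    else pvScanA dst path rest (PySem.Set.add visited neighbor)
        (queue ++ [(neighbor, path ++ [neighbor])])

-- A's 'while queue' loop
def pvLoopA (nbrs : PySem.Dict String (List (String × String))) (dst : String) :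
    Nat → PySem.Set String → List (String × List String) → List String
  | 0, _, _ => []
  | _ + 1, _, [] => []
  | fuel + 1, visited, (current, path) :: rest =>
    match pvScanA dst path (nbrs.getD current []) visited rest with
    | .inl res => res
    | .inr (v, q) => pvLoopA nbrs dst fuel v q

def find_attack_path_py (src : String) (dst : String)
    (net_to_nodes : List (String × List String)) : List String :=
  if src = dst then [src]
  else
    let items := (PySem.Dict.ofList net_to_nodes).items
    pvLoopA (pvNbrsA items) dst (pvFuel items) (PySem.Set.add PySem.Set.empty src) [(src, [src])]

-- ===== PORT B =====
-- B's own iteration bound, same totality-guard reasoning as pvFuel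
def pvFuelB (items : List (String × List String)) : Nat :=
  items.foldl (fun n p => n + p.2.length) 2

-- B's per-entry index step: node → list of network names (one per occurrence)
def pvItemB (d : PySem.Dict String (List String)) (p : String × List String) :
    PySem.Dict String (List String) :=
  p.2.foldl (fun d node => d.modify node [] (fun l => l ++ [p.1])) d

-- B's linear node → network-name index
def pvIndexB (items : List (String × List String)) : PySem.Dict String (List String) :=
  items.foldl pvItemB PySem.Dict.empty

-- B's path reconstruction: python's 'while path[-1] != src: path.append(parent[path[-1]])'
-- followed by reverse, kept here with the list built front-to-back (head = python's path[-1]);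
-- the fuel guard and the 'none' branch are unreachable (every parent chain ends at src).
def pvRebuild (parent : PySem.Dict String String) (src : String) :
    Nat → String → List String → List String
  | 0, _, acc => acc
  | f + 1, last, acc =>
    if last = src then acc
    else
      match parent.get? last with
      | some p => pvRebuild parent src f p (p :: acc)
      | none => acc

-- B's inner 'for w in net_to_nodes[net_name]' loop (early return = .inl)
def pvScanMB (src dst current : String) (F : Nat) :
    List String → PySem.Set String → PySem.Dict String String → List String →
    Sum (List String) (PySem.Set String × PySem.Dict String String × List String)
  | [], visited, parent, queue => .inr (visited, parent, queue)
  | w :: rest, visited, parent, queue =>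
    if w = current then pvScanMB src dst current F rest visited parent queue
    else if w = dst then .inl (pvRebuild (parent.insert w current) src F w [w])
    else if visited.contains w then pvScanMB src dst current F rest visited parent queue
    else pvScanMB src dst current F rest (PySem.Set.add visited w)
        (parent.insert w current) (queue ++ [w])

-- B's 'for net_name in member_of.get(current, [])' loop with the used-net skip
def pvScanNB (nd : PySem.Dict String (List String)) (src dst current : String) (F : Nat) :
    List String → PySem.Set String → PySem.Set String → PySem.Dict String String → List String →
    Sum (List String)
      (PySem.Set String × PySem.Set String × PySem.Dict String String × List String)
  | [], visited, used, parent, queue => .inr (visited, used, parent, queue)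
  | net :: rest, visited, used, parent, queue =>
    if used.contains net then pvScanNB nd src dst current F rest visited used parent queue
    else
      match pvScanMB src dst current F (nd.getD net []) visited parent queue with
      | .inl r => .inl r
      | .inr (v, pa, q) => pvScanNB nd src dst current F rest v (PySem.Set.add used net) pa q

-- B's 'while queue' loop (deque popleft = head; queue holds plain nodes)
def pvLoopB (nd idx : PySem.Dict String (List String)) (src dst : String) (F : Nat) :
    Nat → PySem.Set String → PySem.Set String → PySem.Dict String String → List String →
    List String
  | 0, _, _, _, _ => []
  | _ + 1, _, _, _, [] => []
  | fuel + 1, visited, used, parent, current :: rest =>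
    match pvScanNB nd src dst current F (idx.getD current []) visited used parent rest with
    | .inl r => r
    | .inr (v, u, pa, q) => pvLoopB nd idx src dst F fuel v u pa q

def find_attack_path_py_alt (src : String) (dst : String)
    (net_to_nodes : List (String × List String)) : List String :=
  if src = dst then [src]
  else
    let nd := PySem.Dict.ofList net_to_nodes
    let F := pvFuelB nd.items
    pvLoopB nd (pvIndexB nd.items) src dst F F (PySem.Set.add PySem.Set.empty src)
      PySem.Set.empty PySem.Dict.empty [src]

-- ===== PRECONDITION & SPEC =====
def Spec_find_attack_path_py (src : String) (dst : String) (net_to_nodes : List (String × List String)) (out : List String) : Prop := out = find_attack_path_py_alt src dst net_to_nodes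
instance (src : String) (dst : String) (net_to_nodes : List (String × List String)) (out : List String) : Decidable (Spec_find_attack_path_py src dst net_to_nodes out) := by unfold Spec_find_attack_path_py; infer_instance

-- ===== CLAIM (what is proved, stated in full; the proofs are below) =====
def Claim_equal_find_attack_path_py : Prop := ∀ (src : String) (dst : String) (net_to_nodes : List (String × List String)), Dom_find_attack_path_py src dst net_to_nodes → Spec_find_attack_path_py src dst net_to_nodes (find_attack_path_py src dst net_to_nodes)

-- ===== LEMMAS AND PROOFS =====

-- the (neighbor, via_net) pairs A stores for node u from one network entry p
def pvBlock (u : String) (p : String × List String) : List (String × String) :=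
  (p.2.filter (fun w => w ≠ u)).map (fun w => (w, p.1))

-- the network entries containing u: entry p once per occurrence of u in p.2
def pvOcc (u : String) (items : List (String × List String)) : List (String × List String) :=
  items.flatMap (fun p => List.replicate (p.2.count u) p)

-- all member nodes, with multiplicity
def pvAllNodes (items : List (String × List String)) : List String :=
  items.flatMap Prod.snd

-- every network already expanded contains no dst and only visited members
def pvGood (dst : String) (items : List (String × List String))
    (used visited : PySem.Set String) : Prop :=
  ∀ p ∈ items, p.1 ∈ used → ∀ w ∈ p.2, w ≠ dst ∧ w ∈ visited

-- the parent chain of n spells out a path src … n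
inductive PChain (parent : PySem.Dict String String) (src : String) : String → List String → Prop
  | base : PChain parent src src [src]
  | step {n p : String} {rest : List String} :
      parent.get? n = some p → n ≠ src → PChain parent src p rest →
      PChain parent src n (rest ++ [n])

-- joint invariant of A's path-carrying queue and B's parent dict
def pvEnt (src dst : String) (visited : PySem.Set String) (parent : PySem.Dict String String)
    (e : String × List String) : Prop :=
  PChain parent src e.1 e.2 ∧ e.2.Nodup ∧ (∀ x ∈ e.2, x ∈ visited) ∧ e.1 ≠ dst

def pvSInv (items : List (String × List String)) (src dst : String)
    (visited : PySem.Set String) (parent : PySem.Dict String String)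
    (qa : List (String × List String)) : Prop :=
  dst ∉ visited ∧ src ∈ visited ∧ visited.Nodup ∧
  (∀ x ∈ visited, x ∈ src :: pvAllNodes items) ∧
  ∀ e ∈ qa, pvEnt src dst visited parent e

-- ---- small generic facts ----

lemma pvFoldl_len (items : List (String × List String)) :
    ∀ c : Nat, items.foldl (fun n p => n + p.2.length) c = c + (pvAllNodes items).length := by
  induction items with
  | nil => intro c; simp [pvAllNodes]
  | cons p rest ih => intro c; simp [pvAllNodes, ih]; omega

lemma pvFuel_eq (items : List (String × List String)) :
    pvFuel items = (pvAllNodes items).length + 2 := by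
  rw [pvFuel, pvFoldl_len]; omega

lemma pvLen_le {p L : List String} (hnd : p.Nodup) (hsub : ∀ x ∈ p, x ∈ L) :
    p.length ≤ L.length :=
  calc p.length = p.toFinset.card := (List.toFinset_card_of_nodup hnd).symm
  _ ≤ L.toFinset.card :=
      Finset.card_le_card (fun x hx => List.mem_toFinset.mpr (hsub x (List.mem_toFinset.mp hx)))
  _ ≤ L.length := L.toFinset_card_le

-- ---- chain lemmas ----

lemma pvChain_mem {parent : PySem.Dict String String} {src n : String} {p : List String}
    (h : PChain parent src n p) : n ∈ p := by
  induction h with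
  | base => simp
  | step _ _ _ _ => simp

lemma pvChain_getLast? {parent : PySem.Dict String String} {src n : String} {p : List String}
    (h : PChain parent src n p) : p.getLast? = some n := by
  cases h with
  | base => rfl
  | step _ _ _ => simp

lemma pvChain_insert {parent : PySem.Dict String String} {src n : String} {p : List String}
    (h : PChain parent src n p) (w c : String) (hw : ∀ x ∈ p, x ≠ w) :
    PChain (parent.insert w c) src n p := by
  induction h with
  | base => exact PChain.base
  | step hget hne hch ih =>
    refine PChain.step ?_ hne (ih (fun x hx => hw x (by simp [hx])))
    rw [PySem.Dict.get?_insert, if_neg (hw _ (by simp)), hget]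

lemma pvRebuild_eq {parent : PySem.Dict String String} {src n : String} {p : List String}
    (h : PChain parent src n p) :
    ∀ (f : Nat) (acc : List String), p.length ≤ f + 1 →
      pvRebuild parent src f n acc = p.dropLast ++ acc := by
  induction h with
  | base => intro f acc _; cases f <;> simp [pvRebuild]
  | @step n' p' rest' hget hne hch ih =>
    intro f acc hlen
    cases f with
    | zero =>
      exfalso
      have hmem := pvChain_mem hch
      cases rest' with
      | nil => simp at hmem
      | cons a l => simp at hlen
    | succ f =>
      have hr : pvRebuild parent src (f + 1) n' acc = pvRebuild parent src f p' (p' :: acc) := by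
        simp only [pvRebuild, if_neg hne, hget]
      rw [hr, ih f _ (by simp at hlen ⊢; omega)]
      have hne' : rest' ≠ [] := by
        intro hnil
        have := pvChain_mem hch
        rw [hnil] at this; simp at this
      have hlast := pvChain_getLast? hch
      have hsplit := List.dropLast_append_getLast hne'
      rw [List.getLast?_eq_some_getLast hne'] at hlast
      simp only [Option.some.injEq] at hlast
      rw [hlast] at hsplit
      have hstep : rest' ++ acc = rest'.dropLast ++ p' :: acc := by
        conv_lhs => rw [← hsplit]
        simp
      rw [List.dropLast_concat]
      exact hstep.symm

-- ---- adjacency characterization (A) ----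

lemma pvInnerA_getD (net node : String) (members : List String)
    (d : PySem.Dict String (List (String × String))) (u : String) :
    (pvInnerA net node members d).getD u []
    = d.getD u [] ++ (if u = node then pvBlock u (net, members) else []) := by
  induction members generalizing d with
  | nil => simp [pvInnerA, pvBlock]
  | cons w rest ih =>
    simp only [pvInnerA, List.foldl_cons] at ih ⊢
    by_cases hw : w = node
    · rw [if_neg (by simp [hw]), ih]
      by_cases hu : u = node
      · subst hu
        rw [if_pos rfl, if_pos rfl]
        congr 1
        simp [pvBlock, hw]
      · rw [if_neg hu, if_neg hu]
    · rw [if_pos hw, ih]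
      by_cases hu : u = node
      · subst hu
        rw [if_pos rfl, if_pos rfl, PySem.Dict.getD_modify, if_pos rfl]
        rw [List.append_assoc]
        congr 1
        simp only [pvBlock, List.filter_cons]
        rw [if_pos (by simpa using Ne.symm (fun h => hw h.symm))]
        simp
      · rw [if_neg hu, if_neg hu, PySem.Dict.getD_modify, if_neg hu]

lemma pvEnsureA_getD (node : String) (d : PySem.Dict String (List (String × String))) (u : String) :
    ((if d.contains node then d else d.insert node []) :
      PySem.Dict String (List (String × String))).getD u [] = d.getD u [] := by
  by_cases h : d.contains node = true
  · rw [if_pos h]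
  · rw [if_neg h, PySem.Dict.getD_insert]
    by_cases hu : u = node
    · rw [if_pos hu, hu]
      symm
      apply PySem.Dict.getD_of_not_contains
      simpa using h
    · rw [if_neg hu]

lemma pvItemA_getD (p : String × List String) (outer : List String)
    (d : PySem.Dict String (List (String × String))) (u : String) :
    (outer.foldl
      (fun d node => pvInnerA p.1 node p.2 (if d.contains node then d else d.insert node [])) d).getD u []
    = d.getD u [] ++ (List.replicate (outer.count u) (pvBlock u p)).flatten := by
  induction outer generalizing d with
  | nil => simp
  | cons node rest ih =>
    simp only [List.foldl_cons]
    rw [ih, pvInnerA_getD, pvEnsureA_getD]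
    by_cases hu : u = node
    · subst hu
      rw [if_pos rfl, List.count_cons_self, List.replicate_succ, List.flatten_cons,
        List.append_assoc]
    · rw [if_neg hu, List.append_nil]
      congr 2
      simp [Ne.symm hu]

lemma pvNbrsA_getD (items : List (String × List String)) (u : String) :
    (pvNbrsA items).getD u [] = (pvOcc u items).flatMap (pvBlock u) := by
  suffices h : ∀ d : PySem.Dict String (List (String × String)),
      (items.foldl pvItemA d).getD u [] = d.getD u [] ++ (pvOcc u items).flatMap (pvBlock u) by
    simpa [pvNbrsA] using h PySem.Dict.empty
  induction items with
  | nil => intro d; simp [pvOcc]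
  | cons p rest ih =>
    intro d
    simp only [List.foldl_cons]
    rw [ih]
    have h1 : (pvItemA d p).getD u []
        = d.getD u [] ++ (List.replicate (p.2.count u) (pvBlock u p)).flatten :=
      pvItemA_getD p p.2 d u
    rw [h1, List.append_assoc]
    congr 1
    simp only [pvOcc, List.flatMap_cons, List.flatMap_append]
    congr 1
    induction p.2.count u with
    | zero => simp
    | succ n ihn => simp [List.replicate_succ, List.flatMap_cons, ihn]

-- ---- index characterization (B) ----

lemma pvItemB_getD (p : String × List String) (members : List String)
    (d : PySem.Dict String (List String)) (u : String) :
    (members.foldl (fun d node => d.modify node [] (fun l => l ++ [p.1])) d).getD u []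
      = d.getD u [] ++ List.replicate (members.count u) p.1 := by
  induction members generalizing d with
  | nil => simp
  | cons w rest ih =>
    simp only [List.foldl_cons]
    rw [ih, PySem.Dict.getD_modify]
    by_cases hu : u = w
    · subst hu
      rw [if_pos rfl, List.count_cons_self, List.replicate_succ, List.append_assoc]
      rfl
    · rw [if_neg hu]
      congr 2
      simp [Ne.symm hu]

lemma pvIndexB_getD (items : List (String × List String)) (u : String) :
    (pvIndexB items).getD u [] = (pvOcc u items).map Prod.fst := by
  suffices h : ∀ d : PySem.Dict String (List String),
      (items.foldl pvItemB d).getD u [] = d.getD u [] ++ (pvOcc u items).map Prod.fst by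
    simpa [pvIndexB] using h PySem.Dict.empty
  induction items with
  | nil => intro d; simp [pvOcc]
  | cons p rest ih =>
    intro d
    simp only [List.foldl_cons]
    rw [ih, show pvItemB d p = p.2.foldl (fun d node => d.modify node [] (fun l => l ++ [p.1])) d from rfl,
      pvItemB_getD]
    simp [pvOcc, List.append_assoc]

lemma pvOcc_mem {u : String} {items : List (String × List String)} {p : String × List String}
    (h : p ∈ pvOcc u items) : p ∈ items := by
  simp only [pvOcc, List.mem_flatMap] at h
  obtain ⟨q, hq, hrep⟩ := h
  rwa [List.eq_of_mem_replicate hrep]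

-- ---- A-side scan lemmas ----

lemma pvScanA_append (dst : String) (path : List String) (l1 l2 : List (String × String))
    (visited : PySem.Set String) (queue : List (String × List String)) :
    pvScanA dst path (l1 ++ l2) visited queue
      = match pvScanA dst path l1 visited queue with
        | .inl r => .inl r
        | .inr (v, q) => pvScanA dst path l2 v q := by
  induction l1 generalizing visited queue with
  | nil => simp [pvScanA]
  | cons x rest ih =>
    obtain ⟨n, net⟩ := x
    simp only [List.cons_append, pvScanA]
    split_ifs with h1 h2
    · rfl
    · exact ih _ _
    · exact ih _ _

lemma pvScanA_noop (dst : String) (path : List String) (l : List (String × String))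
    (visited : PySem.Set String) (queue : List (String × List String))
    (h : ∀ x ∈ l, x.1 ≠ dst ∧ x.1 ∈ visited) :
    pvScanA dst path l visited queue = .inr (visited, queue) := by
  induction l with
  | nil => rfl
  | cons x rest ih =>
    obtain ⟨n, net⟩ := x
    have hx := h (n, net) (List.mem_cons_self ..)
    simp only [pvScanA]
    rw [if_neg hx.1, if_pos (by simpa using hx.2)]
    exact ih (fun y hy => h y (List.mem_cons_of_mem _ hy))

lemma pvScanA_inr (dst : String) (path : List String) :
    ∀ (l : List (String × String)) (visited : PySem.Set String)
      (queue : List (String × List String)) (v : PySem.Set String)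
      (q : List (String × List String)),
    pvScanA dst path l visited queue = .inr (v, q) →
      (∀ x ∈ visited, x ∈ v) ∧ (∀ y ∈ l, y.1 ≠ dst ∧ y.1 ∈ v) := by
  intro l
  induction l with
  | nil =>
    intro visited queue v q h
    simp only [pvScanA, Sum.inr.injEq, Prod.mk.injEq] at h
    obtain ⟨hv, hq⟩ := h
    subst hv; subst hq
    exact ⟨fun x hx => hx, by simp⟩
  | cons x rest ih =>
    intro visited queue v q h
    obtain ⟨n, net⟩ := x
    simp only [pvScanA] at h
    split_ifs at h with h1 h2
    · obtain ⟨mono, hrest⟩ := ih _ _ _ _ h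
      refine ⟨mono, ?_⟩
      intro y hy
      rcases List.mem_cons.mp hy with hy | hy
      · subst hy; exact ⟨h1, mono _ (by simpa using h2)⟩
      · exact hrest y hy
    · obtain ⟨mono, hrest⟩ := ih _ _ _ _ h
      have hnv : n ∈ v := mono _ (by simp [PySem.Set.mem_add])
      refine ⟨fun x hx => mono _ (by simp [PySem.Set.mem_add, hx]), ?_⟩
      intro y hy
      rcases List.mem_cons.mp hy with hy | hy
      · subst hy; exact ⟨h1, hnv⟩
      · exact hrest y hy

-- ---- the member scan simulation ----

lemma pvScanMB_spec (items : List (String × List String)) (src dst current net : String)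
    (F : Nat) (hF : (pvAllNodes items).length + 2 = F) (path : List String) :
    ∀ (members : List String) (visited : PySem.Set String)
      (parent : PySem.Dict String String) (qa : List (String × List String)),
    (∀ x ∈ members, x ∈ pvAllNodes items) →
    pvSInv items src dst visited parent qa →
    PChain parent src current path → path.Nodup → (∀ x ∈ path, x ∈ visited) →
    ((∀ r, pvScanA dst path (pvBlock current (net, members)) visited qa = .inl r →
        pvScanMB src dst current F members visited parent (qa.map Prod.fst) = .inl r) ∧
     (∀ v qa', pvScanA dst path (pvBlock current (net, members)) visited qa = .inr (v, qa') →
        ∃ pa', pvScanMB src dst current F members visited parent (qa.map Prod.fst)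
            = .inr (v, pa', qa'.map Prod.fst) ∧
          pvSInv items src dst v pa' qa' ∧ PChain pa' src current path ∧
          (∀ x ∈ path, x ∈ v))) := by
  intro members
  induction members with
  | nil =>
    intro visited parent qa _ hinv hch hnd hpv
    constructor
    · intro r h; simp [pvBlock, pvScanA] at h
    · intro v qa' h
      simp only [pvBlock, List.filter_nil, List.map_nil, pvScanA, Sum.inr.injEq,
        Prod.mk.injEq] at h
      obtain ⟨hv, hq⟩ := h; subst hv; subst hq
      exact ⟨parent, rfl, hinv, hch, hpv⟩
  | cons w rest ih =>
    intro visited parent qa hmem hinv hch hnd hpv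
    have hmem' : ∀ x ∈ rest, x ∈ pvAllNodes items := fun x hx => hmem x (List.mem_cons_of_mem _ hx)
    obtain ⟨hdv, hsv, hvnd, hvsub, hq⟩ := hinv
    by_cases hwc : w = current
    · -- python 'if w == current: continue'; A's block drops w via the filter
      have hfa : pvBlock current (net, w :: rest) = pvBlock current (net, rest) := by
        simp [pvBlock, hwc]
      have hfb : pvScanMB src dst current F (w :: rest) visited parent (qa.map Prod.fst)
          = pvScanMB src dst current F rest visited parent (qa.map Prod.fst) := by
        simp [pvScanMB, hwc]
      rw [hfa, hfb]
      exact ih visited parent qa hmem' ⟨hdv, hsv, hvnd, hvsub, hq⟩ hch hnd hpv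
    · have hfa : pvBlock current (net, w :: rest)
          = (w, net) :: pvBlock current (net, rest) := by
        simp [pvBlock, hwc]
      rw [hfa]
      by_cases hwd : w = dst
      · -- A returns path ++ [w]; B rebuilds the same path from parent pointers
        subst hwd
        have hxw : ∀ x ∈ path, x ≠ w := fun x hx heq => hdv (heq ▸ hpv x hx)
        have hch' : PChain (parent.insert w current) src current path :=
          pvChain_insert hch w current hxw
        have hchain : PChain (parent.insert w current) src w (path ++ [w]) :=
          PChain.step (by rw [PySem.Dict.get?_insert, if_pos rfl]) (fun h => hdv (h ▸ hsv)) hch'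
        have hlen : (path ++ [w]).length ≤ F + 1 := by
          have h1 : path.length ≤ (src :: pvAllNodes items).length :=
            pvLen_le hnd (fun x hx => hvsub x (hpv x hx))
          simp at h1 ⊢
          omega
        have hreb : pvRebuild (parent.insert w current) src F w [w] = path ++ [w] := by
          rw [pvRebuild_eq hchain F [w] hlen, List.dropLast_concat]
        have hB : pvScanMB src w current F (w :: rest) visited parent (qa.map Prod.fst)
            = .inl (pvRebuild (parent.insert w current) src F w [w]) := by
          simp [pvScanMB, hwc]
        constructor
        · intro r h
          rw [hB, hreb]
          simpa [pvScanA] using h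
        · intro v qa' h
          simp [pvScanA] at h
      · -- w ≠ dst
        by_cases hwv : w ∈ visited
        · have hfb : pvScanMB src dst current F (w :: rest) visited parent (qa.map Prod.fst)
              = pvScanMB src dst current F rest visited parent (qa.map Prod.fst) := by
            simp only [pvScanMB]
            rw [if_neg hwc, if_neg hwd, if_pos (by simpa using hwv)]
          have hfa2 : pvScanA dst path ((w, net) :: pvBlock current (net, rest)) visited qa
              = pvScanA dst path (pvBlock current (net, rest)) visited qa := by
            simp only [pvScanA]
            rw [if_neg hwd, if_pos (by simpa using hwv)]
          rw [hfa2, hfb]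
          exact ih visited parent qa hmem' ⟨hdv, hsv, hvnd, hvsub, hq⟩ hch hnd hpv
        · -- fresh node: A enqueues (w, path ++ [w]); B enqueues w and records parent[w] = current
          have hxw : ∀ x ∈ path, x ≠ w := fun x hx heq => hwv (heq ▸ hpv x hx)
          have hfb : pvScanMB src dst current F (w :: rest) visited parent (qa.map Prod.fst)
              = pvScanMB src dst current F rest (PySem.Set.add visited w)
                  (parent.insert w current) (qa.map Prod.fst ++ [w]) := by
            simp only [pvScanMB]
            rw [if_neg hwc, if_neg hwd, if_neg (by simpa using hwv)]
          have hfa2 : pvScanA dst path ((w, net) :: pvBlock current (net, rest)) visited qa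
              = pvScanA dst path (pvBlock current (net, rest)) (PySem.Set.add visited w)
                  (qa ++ [(w, path ++ [w])]) := by
            simp only [pvScanA]
            rw [if_neg hwd, if_neg (by simpa using hwv)]
          rw [hfa2, hfb]
          have hmap : (qa ++ [(w, path ++ [w])]).map Prod.fst = qa.map Prod.fst ++ [w] := by
            simp
          rw [← hmap]
          -- re-establish all invariants for the extended state
          have hch2 : PChain (parent.insert w current) src current path :=
            pvChain_insert hch w current hxw
          have hinv2 : pvSInv items src dst (PySem.Set.add visited w)
              (parent.insert w current) (qa ++ [(w, path ++ [w])]) := by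
            refine ⟨?_, ?_, ?_, ?_, ?_⟩
            · intro hmem2
              rcases (PySem.Set.mem_add ..).mp hmem2 with h | h
              · exact hdv h
              · exact hwd h.symm
            · exact (PySem.Set.mem_add ..).mpr (Or.inl hsv)
            · exact PySem.Set.nodup_add visited w hvnd
            · intro x hx
              rcases (PySem.Set.mem_add ..).mp hx with h | h
              · exact hvsub x h
              · rw [h]; exact List.mem_cons_of_mem _ (hmem w (List.mem_cons_self ..))
            · intro e he
              rcases List.mem_append.mp he with he | he
              · obtain ⟨hc1, hc2, hc3, hc4⟩ := hq e he
                refine ⟨pvChain_insert hc1 w current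
                  (fun x hx heq => hwv (heq ▸ hc3 x hx)), hc2, ?_, hc4⟩
                intro x hx
                exact (PySem.Set.mem_add ..).mpr (Or.inl (hc3 x hx))
              · simp only [List.mem_singleton] at he
                subst he
                refine ⟨?_, ?_, ?_, hwd⟩
                · exact PChain.step (by rw [PySem.Dict.get?_insert, if_pos rfl])
                    (fun h => hwv (by rw [show w = src from h]; exact hsv)) hch2
                · have hwp : w ∉ path := fun hp => hwv (hpv w hp)
                  simp [List.nodup_append, hnd]
                  exact hxw
                · intro x hx
                  rcases List.mem_append.mp hx with hx | hx
                  · exact (PySem.Set.mem_add ..).mpr (Or.inl (hpv x hx))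
                  · simp only [List.mem_singleton] at hx
                    subst hx
                    exact (PySem.Set.mem_add ..).mpr (Or.inr rfl)
          exact ih (PySem.Set.add visited w) (parent.insert w current)
            (qa ++ [(w, path ++ [w])]) hmem' hinv2 hch2 hnd
            (fun x hx => (PySem.Set.mem_add ..).mpr (Or.inl (hpv x hx)))

-- ---- the network scan simulation ----

lemma pvScanNB_spec (items : List (String × List String)) (nd : PySem.Dict String (List String))
    (hkn : (items.map Prod.fst).Nodup) (hlook : ∀ p ∈ items, nd.getD p.1 [] = p.2)
    (src dst current : String) (hcd : current ≠ dst) (path : List String)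
    (F : Nat) (hF : (pvAllNodes items).length + 2 = F) :
    ∀ (pairs : List (String × List String)) (visited used : PySem.Set String)
      (parent : PySem.Dict String String) (qa : List (String × List String)),
    (∀ p ∈ pairs, p ∈ items) → pvGood dst items used visited →
    pvSInv items src dst visited parent qa →
    PChain parent src current path → path.Nodup → (∀ x ∈ path, x ∈ visited) →
    ((∀ r, pvScanA dst path (pairs.flatMap (pvBlock current)) visited qa = .inl r →
        pvScanNB nd src dst current F (pairs.map Prod.fst) visited used parent
          (qa.map Prod.fst) = .inl r) ∧
     (∀ v qa', pvScanA dst path (pairs.flatMap (pvBlock current)) visited qa = .inr (v, qa') →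
        ∃ u' pa', pvScanNB nd src dst current F (pairs.map Prod.fst) visited used parent
            (qa.map Prod.fst) = .inr (v, u', pa', qa'.map Prod.fst) ∧
          pvGood dst items u' v ∧ pvSInv items src dst v pa' qa')) := by
  intro pairs
  induction pairs with
  | nil =>
    intro visited used parent qa _ hgood hinv _ _ _
    constructor
    · intro r h; simp [pvScanA] at h
    · intro v qa' h
      simp only [List.flatMap_nil, pvScanA, Sum.inr.injEq, Prod.mk.injEq] at h
      obtain ⟨hv, hq⟩ := h; subst hv; subst hq
      exact ⟨used, parent, rfl, hgood, hinv⟩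
  | cons p rest ih =>
    intro visited used parent qa hsub hgood hinv hch hnd hpv
    obtain ⟨net, members⟩ := p
    have hmem : (net, members) ∈ items := hsub _ (List.mem_cons_self ..)
    have hrsub : ∀ q ∈ rest, q ∈ items := fun q hq => hsub q (List.mem_cons_of_mem _ hq)
    rw [List.flatMap_cons, pvScanA_append]
    simp only [List.map_cons]
    by_cases hused : net ∈ used
    · -- skipped net: A's scan of its block is a no-op by the invariant
      have hnoop : pvScanA dst path (pvBlock current (net, members)) visited qa
          = .inr (visited, qa) := by
        apply pvScanA_noop
        intro x hx
        simp only [pvBlock, List.mem_map, List.mem_filter] at hx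
        obtain ⟨w, ⟨hw, _⟩, hxw⟩ := hx
        rw [← hxw]
        exact (hgood _ hmem hused) w hw
      have hB : pvScanNB nd src dst current F (net :: rest.map Prod.fst) visited used parent
            (qa.map Prod.fst)
          = pvScanNB nd src dst current F (rest.map Prod.fst) visited used parent
            (qa.map Prod.fst) := by
        simp only [pvScanNB]
        rw [if_pos (by simpa using hused)]
      rw [hnoop, hB]
      exact ih visited used parent qa hrsub hgood hinv hch hnd hpv
    · have hndlook : nd.getD net [] = members := hlook _ hmem
      have hmemsub : ∀ x ∈ members, x ∈ pvAllNodes items := by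
        intro x hx
        simp only [pvAllNodes, List.mem_flatMap]
        exact ⟨(net, members), hmem, hx⟩
      obtain ⟨hMBl, hMBr⟩ := pvScanMB_spec items src dst current net F hF path members
        visited parent qa hmemsub hinv hch hnd hpv
      have hB : pvScanNB nd src dst current F (net :: rest.map Prod.fst) visited used parent
            (qa.map Prod.fst)
          = match pvScanMB src dst current F members visited parent (qa.map Prod.fst) with
            | .inl r => .inl r
            | .inr (v, pa, q) =>
                pvScanNB nd src dst current F (rest.map Prod.fst) v
                  (PySem.Set.add used net) pa q := by
        simp only [pvScanNB, hndlook]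
        rw [if_neg (by simpa using hused)]
      rw [hB]
      cases hScan : pvScanA dst path (pvBlock current (net, members)) visited qa with
      | inl r' =>
        rw [hMBl r' hScan]
        constructor
        · intro r h; simpa using h
        · intro v qa' h; simp at h
      | inr vq =>
        obtain ⟨v1, qa1⟩ := vq
        obtain ⟨pa1, hBeq, hinv1, hch1, hpv1⟩ := hMBr v1 qa1 hScan
        rw [hBeq]
        simp only
        obtain ⟨mono, hall⟩ := pvScanA_inr dst path _ _ _ _ _ hScan
        have hcv1 : current ∈ v1 := hpv1 current (pvChain_mem hch)
        have hgood' : pvGood dst items (PySem.Set.add used net) v1 := by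
          intro p' hp' hpu w hw
          rcases (PySem.Set.mem_add ..).mp hpu with hpu | hpu
          · exact ⟨(hgood p' hp' hpu w hw).1, mono _ (hgood p' hp' hpu w hw).2⟩
          · have hpeq : p' = (net, members) :=
              List.inj_on_of_nodup_map hkn hp' hmem (by simpa using hpu)
            subst hpeq
            by_cases hwc : w = current
            · subst hwc; exact ⟨hcd, hcv1⟩
            · have hblk : (w, net) ∈ pvBlock current (net, members) := by
                simp only [pvBlock, List.mem_map, List.mem_filter]
                exact ⟨w, ⟨hw, by simpa using hwc⟩, rfl⟩
              exact hall _ hblk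
        exact ih v1 (PySem.Set.add used net) pa1 qa1 hrsub hgood' hinv1 hch1 hnd hpv1

-- ---- main lockstep simulation of the two BFS loops ----

lemma pvLoop_eq (items : List (String × List String)) (nd : PySem.Dict String (List String))
    (hkn : (items.map Prod.fst).Nodup) (hlook : ∀ p ∈ items, nd.getD p.1 [] = p.2)
    (src dst : String) (F : Nat) (hF : (pvAllNodes items).length + 2 = F) :
    ∀ (fuel : Nat) (visited used : PySem.Set String) (parent : PySem.Dict String String)
      (qa : List (String × List String)),
    pvGood dst items used visited → pvSInv items src dst visited parent qa →
    pvLoopB nd (pvIndexB items) src dst F fuel visited used parent (qa.map Prod.fst)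
      = pvLoopA (pvNbrsA items) dst fuel visited qa := by
  intro fuel
  induction fuel with
  | zero => intro _ _ _ _ _ _; rfl
  | succ n ihf =>
    intro visited used parent qa hgood hinv
    cases qa with
    | nil => rfl
    | cons hd rest =>
      obtain ⟨current, path⟩ := hd
      obtain ⟨hch, hnd, hpv, hcd⟩ := hinv.2.2.2.2 _ (List.mem_cons_self ..)
      have hinv' : pvSInv items src dst visited parent rest :=
        ⟨hinv.1, hinv.2.1, hinv.2.2.1, hinv.2.2.2.1,
          fun e he => hinv.2.2.2.2 e (List.mem_cons_of_mem _ he)⟩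
      have hadjA : (pvNbrsA items).getD current []
          = (pvOcc current items).flatMap (pvBlock current) := pvNbrsA_getD items current
      have hadjB : (pvIndexB items).getD current []
          = (pvOcc current items).map Prod.fst := pvIndexB_getD items current
      obtain ⟨hinl, hinr⟩ := pvScanNB_spec items nd hkn hlook src dst current hcd path F hF
        (pvOcc current items) visited used parent rest
        (fun p hp => pvOcc_mem hp) hgood hinv' hch hnd hpv
      simp only [List.map_cons, pvLoopA, pvLoopB, hadjA, hadjB]
      cases hScan : pvScanA dst path ((pvOcc current items).flatMap (pvBlock current))
          visited rest with
      | inl r => rw [hinl r hScan]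
      | inr vq =>
        obtain ⟨v, q⟩ := vq
        obtain ⟨u', pa', hBeq, hgood', hinv''⟩ := hinr v q hScan
        rw [hBeq]
        exact ihf v u' pa' q hgood' hinv''

-- ===== VERDICT (by name: the statement is the Claim_ definition above) =====
theorem find_attack_path_py_spec : Claim_equal_find_attack_path_py := by
  intro src dst net_to_nodes _
  unfold Spec_find_attack_path_py find_attack_path_py find_attack_path_py_alt
  by_cases h : src = dst
  · simp [h]
  · simp only [h, if_false]
    rw [show pvFuelB = pvFuel from rfl]
    have hkn : (((PySem.Dict.ofList net_to_nodes).items.map Prod.fst).Nodup) := by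
      simpa [PySem.Dict.keys] using PySem.Dict.nodup_keys_ofList (ps := net_to_nodes)
    refine (pvLoop_eq (PySem.Dict.ofList net_to_nodes).items (PySem.Dict.ofList net_to_nodes)
      hkn ?_ src dst _ (pvFuel_eq _).symm (pvFuel (PySem.Dict.ofList net_to_nodes).items)
      (PySem.Set.add PySem.Set.empty src) PySem.Set.empty PySem.Dict.empty
      [(src, [src])] ?_ ?_).symm
    · intro p hp
      exact PySem.Dict.getD_of_mem_items _ hp (by simpa [PySem.Dict.keys] using hkn) []
    · intro p _ hp
      simp [PySem.Set.empty] at hp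
    · refine ⟨?_, ?_, ?_, ?_, ?_⟩
      · intro hmem
        simp [PySem.Set.add, PySem.Set.empty, PySem.Set.contains] at hmem
        exact h hmem.symm
      · simp [PySem.Set.add, PySem.Set.empty]
      · simp [PySem.Set.add, PySem.Set.empty]
      · intro x hx
        simp [PySem.Set.add, PySem.Set.empty] at hx
        simp [hx]
      · intro e he
        simp only [List.mem_singleton] at he
        subst he
        refine ⟨PChain.base, by simp, ?_, fun hd => h hd⟩
        intro x hx
        simp only [List.mem_singleton] at hx
        subst hx
        simp [PySem.Set.add, PySem.Set.empty]
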